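-- pv_equiv track=rewrite | github.com/Crostino14/TinyVLA | test/libero_test/vqa_test/vqa_libero2.py | find_scene_object
-- ===== SOURCE A (Python) =====
-- def canonicalize_object_name(text):
--     clean = text.lower().replace("_", " ").replace("-", " ").strip()
--     return " ".join(clean.split())
--
-- def pretty_object_name(name):
--     base = name
--     base = base.replace("_main", "")
--     if "_" in base and base.split("_")[-1].isdigit():
--         base = "_".join(base.split("_")[:-1])
--     clean = canonicalize_object_name(base)
--     if clean in {"flat stove", "flat stove 1"}:
--         return "stove"
--     return clean
--
-- def find_scene_object(scene_names, query_name):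
--     q = canonicalize_object_name(query_name)
--     for scene_name in scene_names:
--         if canonicalize_object_name(scene_name) == q:
--             return scene_name
--     for scene_name in scene_names:
--         if pretty_object_name(scene_name) == q:
--             return scene_name
--     return None
-- ===== SOURCE B (Python) =====
-- def canonicalize_object_name(text):
--     clean = text.lower().replace("_", " ").replace("-", " ").strip()
--     return " ".join(clean.split())
--
-- def pretty_object_name(name):
--     base = name
--     base = base.replace("_main", "")
--     if "_" in base and base.split("_")[-1].isdigit():
--         base = "_".join(base.split("_")[:-1])
--     clean = canonicalize_object_name(base)
--     if clean in {"flat stove", "flat stove 1"}: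
--         return "stove"
--     return clean
--
-- def find_scene_object(scene_names, query_name):
--     q = canonicalize_object_name(query_name)
--     fallback = None
--     for scene_name in scene_names:
--         if canonicalize_object_name(scene_name) == q:
--             return scene_name
--         if fallback is None and pretty_object_name(scene_name) == q:
--             fallback = scene_name
--     return fallback
-- ===== Notes on version B (the rewrite author's own statement) =====
-- stated objective: alternative
-- what changed: The two priority passes over scene_names (canonical match first, then pretty-name match) are fused into a single loop that returns a canonical match immediately and records only the first pretty match in a fallback accumulator returned after the loop.
import Mathlib
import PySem

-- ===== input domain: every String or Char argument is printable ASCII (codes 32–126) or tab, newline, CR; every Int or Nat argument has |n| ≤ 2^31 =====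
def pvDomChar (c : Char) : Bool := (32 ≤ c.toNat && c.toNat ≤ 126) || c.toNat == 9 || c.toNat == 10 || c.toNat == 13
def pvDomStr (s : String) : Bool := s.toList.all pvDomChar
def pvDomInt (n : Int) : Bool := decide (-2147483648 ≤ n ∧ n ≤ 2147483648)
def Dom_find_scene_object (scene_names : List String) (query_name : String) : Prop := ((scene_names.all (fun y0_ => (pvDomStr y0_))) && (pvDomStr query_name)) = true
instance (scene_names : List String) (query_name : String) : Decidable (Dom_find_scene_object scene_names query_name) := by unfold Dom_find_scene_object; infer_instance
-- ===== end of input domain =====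

-- B fuses A's two priority passes into one loop with a fallback accumulator (objective: alternative).

-- ===== PORT A =====
-- shared module helper: canonicalize_object_name
def canonObjName (text : String) : String :=
  let clean := PySem.Str.strip (PySem.Str.replace (PySem.Str.replace (PySem.Str.lower text) "_" " ") "-" " ")
  PySem.Str.join " " (PySem.Str.split₀ clean)

-- shared module helper: pretty_object_name
def prettyObjName (name : String) : String :=
  let base := name
  let base := PySem.Str.replace base "_main" ""
  -- base.split("_") is always nonempty, so [-1] is its last element
  let base :=
    -- sep "_" is nonempty, so split? never returns none
    if PySem.Str.isIn "_" base && PySem.Str.strIsdigit (((PySem.Str.split? base "_").getD []).getLastD "") then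
      PySem.Str.join "_" (PySem.List.slice ((PySem.Str.split? base "_").getD []) none (some (-1)))
    else base
  let clean := canonObjName base
  if clean = "flat stove" ∨ clean = "flat stove 1" then "stove" else clean

-- A's first loop: first scene_name whose canonical name equals q
def findCanonLoop (q : String) : List String → Option String
  | [] => none
  | s :: rest => if canonObjName s = q then some s else findCanonLoop q rest

-- A's second loop: first scene_name whose pretty name equals q
def findPrettyLoop (q : String) : List String → Option String
  | [] => none
  | s :: rest => if prettyObjName s = q then some s else findPrettyLoop q rest

def find_scene_object (scene_names : List String) (query_name : String) : Option String :=
  let q := canonObjName query_name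
  match findCanonLoop q scene_names with
  | some s => some s
  | none =>
    match findPrettyLoop q scene_names with
    | some s => some s
    | none => none

-- ===== PORT B =====
-- B's single loop: return a canonical match immediately; record only the FIRST pretty match as fallback
def fusedLoop (q : String) (fb : Option String) : List String → Option String
  | [] => fb
  | s :: rest =>
    if canonObjName s = q then some s
    else if fb = none ∧ prettyObjName s = q then fusedLoop q (some s) rest
    else fusedLoop q fb rest

def find_scene_object_alt (scene_names : List String) (query_name : String) : Option String :=
  fusedLoop (canonObjName query_name) none scene_names

-- ===== PRECONDITION & SPEC =====
def Spec_find_scene_object (scene_names : List String) (query_name : String) (out : Option String) : Prop := out = find_scene_object_alt scene_names query_name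
instance (scene_names : List String) (query_name : String) (out : Option String) : Decidable (Spec_find_scene_object scene_names query_name out) := by unfold Spec_find_scene_object; infer_instance

-- ===== CLAIM (what is proved, stated in full; the proofs are below) =====
def Claim_equal_find_scene_object : Prop := ∀ (scene_names : List String) (query_name : String), Dom_find_scene_object scene_names query_name → Spec_find_scene_object scene_names query_name (find_scene_object scene_names query_name)

-- ===== LEMMAS AND PROOFS =====
lemma fusedLoop_eq (q : String) (xs : List String) (fb : Option String) :
    fusedLoop q fb xs =
      match findCanonLoop q xs with
      | some s => some s
      | none => match fb with
                | some f => some f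
                | none => findPrettyLoop q xs := by
  induction xs generalizing fb with
  | nil => cases fb <;> simp [fusedLoop, findCanonLoop, findPrettyLoop]
  | cons s rest ih =>
    by_cases hc : canonObjName s = q
    · simp [fusedLoop, findCanonLoop, hc]
    · by_cases hfb : fb = none
      · subst hfb
        by_cases hp : prettyObjName s = q
        · simp [fusedLoop, findCanonLoop, findPrettyLoop, hc, hp, ih]
        · simp [fusedLoop, findCanonLoop, findPrettyLoop, hc, hp, ih]
      · obtain ⟨f, rfl⟩ := Option.ne_none_iff_exists'.mp hfb
        simp [fusedLoop, findCanonLoop, hc, ih]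

-- ===== VERDICT (by name: the statement is the Claim_ definition above) =====
theorem find_scene_object_spec : Claim_equal_find_scene_object := by
  intro scene_names query_name _
  unfold Spec_find_scene_object find_scene_object find_scene_object_alt
  rw [fusedLoop_eq]
  cases h : findCanonLoop (canonObjName query_name) scene_names
  · simp only [h]
    cases findPrettyLoop (canonObjName query_name) scene_names <;> rfl
  · simp only [h]
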